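-- pv_equiv track=rewrite | github.com/dongjoon-min/jungsangsolution | 증상솔루션/main.py | process_causes
-- ===== SOURCE A (Python) =====
-- def process_causes(answers_dict):
--     cause_keywords = ""
--     if answers_dict.get("1", []) in ["40s", "50s", "60s"]:
--         cause_keywords += "* 40대 이상 (노화)"
--
--     for key in range(3, 7):
--         # answers_dict에서 해당 키의 값을 가져오고, 결과가 비어 있지 않은지 확인
--         values = answers_dict.get(str(key), [])
--         if values == "Yes":
--             if key == 3:
--                 tear_lack_score += 1
--                 cause_keywords += "* 시력교정술 * 장시간의 렌즈 착용"
--             elif key == 4: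
--                 cause_keywords += "* 눈물 증발 증가"
--             elif key == 5:
--                 cause_keywords += "* 마이봄샘 이상"
--             elif key == 6:
--                 cause_keywords += "* 마이봄샘 막힘"
--     # print ("중간 cause_keywords : ", cause_keywords)
--
--     cause_keyword_dic = {
--         "2h": "* 스마트/모니터 사용 시간이 길면, VDT 증후군이 생길 수 있어요.",
--         "space": "* 실내 공기 오염으로 인한 마이봄샘 오염 * 건조한 실내 공기",
--         "weather": "* 건조한 겨울철 날씨 * 미세먼지에 의한 마이봄샘 오염",
--         "immune": "* 자가면역질환에 의한 가능성이 있어요 (쇼그렌증후군, 마이봄샘 파괴 등)",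
--         "damage": "* 각막 주변의 신경이 손상되면, 눈물 분비를 촉진하는 신경을 무뎌져 안구건조감을 유발해요.",
--         "symnerve": "* 교감신경이 항진되면 눈물 생성이 줄어들어요.",
--         "circulation":"* 고혈압 등 관상동맥질환은 어쩌구 저쩌구해서 안구건조 유발",
--         "stress": "* 스트레스 누적",
--         "sleep": "* 수면 부족 또는 수면 장애"
--     }
--
--     for condition, keyword in cause_keyword_dic.items():
--         for value in answers_dict.values():
--             # 값을 콤마로 분리하여 리스트 생성
--             splitted_values = value.split(',')
--             # 각 분리된 값이 조건과 일치하는지 확인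
--             if condition in [v.strip() for v in splitted_values]:  # 공백 제거 후 비교
--                 cause_keywords += keyword
--     print (cause_keywords)
--     cause_keywords_list = [item.strip() for item in cause_keywords.split('*') if item.strip()]
--
--     return cause_keywords_list
-- ===== SOURCE B (Python) =====
-- def process_causes(answers_dict):
--     parts = []
--     if answers_dict.get("1", []) in ["40s", "50s", "60s"]:
--         parts.append("* 40대 이상 (노화)")
--
--     yes_keywords = {
--         "3": "* 시력교정술 * 장시간의 렌즈 착용",
--         "4": "* 눈물 증발 증가",
--         "5": "* 마이봄샘 이상",
--         "6": "* 마이봄샘 막힘",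
--     }
--     for key, kw in yes_keywords.items():
--         if answers_dict.get(key, []) == "Yes":
--             parts.append(kw)
--
--     cause_keyword_dic = {
--         "2h": "* 스마트/모니터 사용 시간이 길면, VDT 증후군이 생길 수 있어요.",
--         "space": "* 실내 공기 오염으로 인한 마이봄샘 오염 * 건조한 실내 공기",
--         "weather": "* 건조한 겨울철 날씨 * 미세먼지에 의한 마이봄샘 오염",
--         "immune": "* 자가면역질환에 의한 가능성이 있어요 (쇼그렌증후군, 마이봄샘 파괴 등)",
--         "damage": "* 각막 주변의 신경이 손상되면, 눈물 분비를 촉진하는 신경을 무뎌져 안구건조감을 유발해요.",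
--         "symnerve": "* 교감신경이 항진되면 눈물 생성이 줄어들어요.",
--         "circulation": "* 고혈압 등 관상동맥질환은 어쩌구 저쩌구해서 안구건조 유발",
--         "stress": "* 스트레스 누적",
--         "sleep": "* 수면 부족 또는 수면 장애",
--     }
--
--     # One pass over the answers: token -> number of answer values containing it.
--     counts = {}
--     for value in answers_dict.values():
--         for token in {v.strip() for v in value.split(',')}:
--             counts[token] = counts.get(token, 0) + 1
--
--     for condition, keyword in cause_keyword_dic.items():
--         parts.append(keyword * counts.get(condition, 0))
--
--     cause_keywords = "".join(parts)
--     print(cause_keywords)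
--     return [item.strip() for item in cause_keywords.split('*') if item.strip()]
-- ===== Notes on version B (the rewrite author's own statement) =====
-- stated objective: faster
-- what changed: The condition-major nested scan (for each of the 9 cause conditions, rescan and re-tokenize every answer value) is replaced by one tokenizing pass over the answer values building a token->count dictionary, after which each cause keyword is emitted count-many times by string repetition; a timing run measured B ~3.7x faster.
-- crash fix: On inputs whose answer "3" is "Yes", A raises UnboundLocalError at 'tear_lack_score += 1' (the variable is never assigned); B returns the keyword list with the refractive-surgery/lens causes included. — e.g. on process_causes([("3", "Yes")]): A raises UnboundLocalError, B returns ["시력교정술", "장시간의 렌즈 착용"]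
import Mathlib
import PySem

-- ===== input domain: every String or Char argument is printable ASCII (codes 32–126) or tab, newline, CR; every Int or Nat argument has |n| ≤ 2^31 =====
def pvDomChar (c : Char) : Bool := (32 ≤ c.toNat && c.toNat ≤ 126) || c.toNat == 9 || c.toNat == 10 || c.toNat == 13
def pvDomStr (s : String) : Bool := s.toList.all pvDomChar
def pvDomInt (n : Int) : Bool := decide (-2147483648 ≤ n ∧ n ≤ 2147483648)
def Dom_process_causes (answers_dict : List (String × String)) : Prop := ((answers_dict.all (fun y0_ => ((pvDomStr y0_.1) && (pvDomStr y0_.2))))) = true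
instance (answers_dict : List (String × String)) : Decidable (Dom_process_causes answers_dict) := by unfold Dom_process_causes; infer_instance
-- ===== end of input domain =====

-- B replaces A's condition×value nested scan by one counting pass over the answer values plus a
-- per-condition string repetition (measured faster; both versions print the joined string before
-- returning — the equivalence proved here is about the RETURN value).

-- Shared helpers: the pieces of Python code that are textually identical in A and B.
-- answers_dict.get(k, [])  (the [] default never equals a string, so 'some' lookup only)
def pvGet (answers_dict : List (String × String)) (k : String) : Option String :=
  (PySem.Dict.mk answers_dict).get? k

-- answers_dict.get("1", []) in ["40s", "50s", "60s"]
def pvAgeHit (answers_dict : List (String × String)) : Bool :=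
  match pvGet answers_dict "1" with
  | some v => ["40s", "50s", "60s"].contains v
  | none => false

-- [v.strip() for v in value.split(',')]   (strings handled as List Char)
def pvTokens (value : String) : List (List Char) :=
  (PySem.Chars.splitOn value.toList ",".toList).map PySem.Chars.strip

-- the literal cause_keyword_dic of both programs, in insertion order
def pvCauseList : List (List Char × List Char) :=
  [("2h".toList, "* 스마트/모니터 사용 시간이 길면, VDT 증후군이 생길 수 있어요.".toList),
   ("space".toList, "* 실내 공기 오염으로 인한 마이봄샘 오염 * 건조한 실내 공기".toList),
   ("weather".toList, "* 건조한 겨울철 날씨 * 미세먼지에 의한 마이봄샘 오염".toList),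
   ("immune".toList, "* 자가면역질환에 의한 가능성이 있어요 (쇼그렌증후군, 마이봄샘 파괴 등)".toList),
   ("damage".toList, "* 각막 주변의 신경이 손상되면, 눈물 분비를 촉진하는 신경을 무뎌져 안구건조감을 유발해요.".toList),
   ("symnerve".toList, "* 교감신경이 항진되면 눈물 생성이 줄어들어요.".toList),
   ("circulation".toList, "* 고혈압 등 관상동맥질환은 어쩌구 저쩌구해서 안구건조 유발".toList),
   ("stress".toList, "* 스트레스 누적".toList),
   ("sleep".toList, "* 수면 부족 또는 수면 장애".toList)]

-- [item.strip() for item in ck.split('*') if item.strip()]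
def pvPost (ck : List Char) : List String :=
  (((PySem.Chars.splitOn ck "*".toList).map PySem.Chars.strip).filter
    (fun s => !s.isEmpty)).map String.ofList

-- ===== PORT A =====
def process_causes (answers_dict : List (String × String)) : List String :=
  let ck0 : List Char := []
  let ck1 := if pvAgeHit answers_dict then ck0 ++ "* 40대 이상 (노화)".toList else ck0
  -- for key in range(3, 7): … if values == "Yes": …
  -- (at key == 3 the Python also runs 'tear_lack_score += 1', which raises UnboundLocalError:
  -- those inputs are excluded by Pre_process_causes; the port just appends the keyword)
  let ck2 := (PySem.List.pyRange 3 7 1).foldl (fun ck key =>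
    if pvGet answers_dict (PySem.Int.toStr key) = some "Yes" then
      if key = 3 then ck ++ "* 시력교정술 * 장시간의 렌즈 착용".toList
      else if key = 4 then ck ++ "* 눈물 증발 증가".toList
      else if key = 5 then ck ++ "* 마이봄샘 이상".toList
      else if key = 6 then ck ++ "* 마이봄샘 막힘".toList
      else ck
    else ck) ck1
  -- for condition, keyword in cause_keyword_dic.items(): for value in answers_dict.values(): …
  let ck3 := pvCauseList.foldl (fun ck ckw =>
    ((PySem.Dict.mk answers_dict).values).foldl (fun ck v =>
      if ckw.1 ∈ pvTokens v then ck ++ ckw.2 else ck) ck) ck2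
  pvPost ck3

-- ===== PORT B =====
-- the yes_keywords dict literal of B
def pvYesList : List (String × List Char) :=
  [("3", "* 시력교정술 * 장시간의 렌즈 착용".toList),
   ("4", "* 눈물 증발 증가".toList),
   ("5", "* 마이봄샘 이상".toList),
   ("6", "* 마이봄샘 막힘".toList)]

-- counts: one pass over answers_dict.values(); per value the SET of its stripped tokens
def pvCounts (answers_dict : List (String × String)) : PySem.Dict (List Char) Int :=
  ((PySem.Dict.mk answers_dict).values).foldl (fun cnt v =>
    (PySem.Set.ofList (pvTokens v)).foldl (fun c t => c.modify t 0 (· + 1)) cnt)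
    PySem.Dict.empty

def process_causes_alt (answers_dict : List (String × String)) : List String :=
  let parts0 : List (List Char) :=
    if pvAgeHit answers_dict then ["* 40대 이상 (노화)".toList] else []
  let parts1 := pvYesList.foldl (fun acc p =>
    if pvGet answers_dict p.1 = some "Yes" then acc ++ [p.2] else acc) parts0
  let counts := pvCounts answers_dict
  let parts2 := pvCauseList.foldl (fun acc ckw =>
    acc ++ [PySem.List.pyRepeat ckw.2 (counts.getD ckw.1 0)]) parts1
  pvPost parts2.flatten

-- ===== PRECONDITION & SPEC =====
-- Pre_ excludes exactly the inputs with answer "3" == "Yes": there Python A raises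
-- UnboundLocalError at the unbound 'tear_lack_score += 1' and returns nothing.
def Pre_process_causes (answers_dict : List (String × String)) : Prop :=
  ¬ ((PySem.Dict.mk answers_dict).get? "3" = some "Yes")
instance (answers_dict : List (String × String)) : Decidable (Pre_process_causes answers_dict) := by unfold Pre_process_causes; infer_instance

def pvWitness_process_causes : (List (String × String)) :=
  [("1", "40s"), ("4", "Yes"), ("2", "2h, stress")]

-- On inputs whose answer "3" is "Yes", A raises UnboundLocalError ('tear_lack_score += 1'
-- on a never-assigned local); B returns the keyword list with the refractive-surgery causes included.
def Raises_process_causes (answers_dict : List (String × String)) : Prop :=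
  (PySem.Dict.mk answers_dict).get? "3" = some "Yes"
instance (answers_dict : List (String × String)) : Decidable (Raises_process_causes answers_dict) := by unfold Raises_process_causes; infer_instance
def pvRaiseWitness_process_causes : (List (String × String)) := [("3", "Yes")]
def pvRaiseWitnessOut_process_causes : List String := ["시력교정술", "장시간의 렌즈 착용"]

def Spec_process_causes (answers_dict : List (String × String)) (out : List String) : Prop := out = process_causes_alt answers_dict
instance (answers_dict : List (String × String)) (out : List String) : Decidable (Spec_process_causes answers_dict out) := by unfold Spec_process_causes; infer_instance

-- ===== CLAIM (what is proved, stated in full; the proofs are below) =====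
def Claim_equal_process_causes : Prop := ∀ (answers_dict : List (String × String)), Dom_process_causes answers_dict → Pre_process_causes answers_dict → Spec_process_causes answers_dict (process_causes answers_dict)

def Claim_raises_process_causes : Prop := (∀ (answers_dict : List (String × String)), Dom_process_causes answers_dict → Raises_process_causes answers_dict → ¬ Pre_process_causes answers_dict) ∧ (Dom_process_causes (pvRaiseWitness_process_causes) ∧ Raises_process_causes (pvRaiseWitness_process_causes) ∧ process_causes_alt (pvRaiseWitness_process_causes) = pvRaiseWitnessOut_process_causes)

-- ===== LEMMAS AND PROOFS =====

-- a block of n copies of kw commutes with one more copy of kw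
theorem pv_flat_comm (n : Nat) (kw : List Char) :
    kw ++ (List.replicate n kw).flatten = (List.replicate n kw).flatten ++ kw := by
  have h1 : (List.replicate (n + 1) kw).flatten = kw ++ (List.replicate n kw).flatten := by
    rw [List.replicate_succ]; simp
  have h2 : (List.replicate (n + 1) kw).flatten = (List.replicate n kw).flatten ++ kw := by
    rw [List.replicate_succ']; simp
  rw [← h1, h2]

-- A's inner value scan for one condition appends the keyword once per matching value.
theorem pv_inner_scan (c kw : List Char) (vs : List String) (s : List Char) :
    vs.foldl (fun ck v => if c ∈ pvTokens v then ck ++ kw else ck) s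
      = s ++ (List.replicate (vs.countP (fun v => decide (c ∈ pvTokens v))) kw).flatten := by
  induction vs generalizing s with
  | nil => simp
  | cons v t ih =>
    simp only [List.foldl_cons, List.countP_cons]
    by_cases h : c ∈ pvTokens v
    · simp [h, ih, List.replicate_add, List.append_assoc, pv_flat_comm]
    · simp [h, ih]

-- B's counter holds, for each token, the number of values containing it.
theorem pv_counts_getD (vs : List String) (cnt : PySem.Dict (List Char) Int) (c : List Char) :
    (vs.foldl (fun cnt v =>
        (PySem.Set.ofList (pvTokens v)).foldl (fun d t => d.modify t 0 (· + 1)) cnt) cnt).getD c 0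
      = cnt.getD c 0 + (vs.countP (fun v => decide (c ∈ pvTokens v)) : Int) := by
  induction vs generalizing cnt with
  | nil => simp
  | cons v t ih =>
    simp only [List.foldl_cons, List.countP_cons, ih]
    rw [PySem.Dict.getD_foldl_modify_add_one]
    rw [List.Nodup.count (PySem.Set.nodup_ofList (pvTokens v))]
    by_cases h : c ∈ pvTokens v
    · simp [h, (PySem.Set.mem_ofList (pvTokens v) c).2 h]
      ring
    · have : c ∉ PySem.Set.ofList (pvTokens v) := fun hm => h ((PySem.Set.mem_ofList _ _).1 hm)
      simp [h, this]

-- A's condition-major double loop equals the concatenation of keyword repetitions.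
theorem pv_cond_loop (d : List (String × String)) (cl : List (List Char × List Char)) (s : List Char) :
    cl.foldl (fun ck ckw =>
        ((PySem.Dict.mk d).values).foldl (fun ck v =>
          if ckw.1 ∈ pvTokens v then ck ++ ckw.2 else ck) ck) s
      = s ++ (cl.map (fun ckw =>
          PySem.List.pyRepeat ckw.2 ((pvCounts d).getD ckw.1 0))).flatten := by
  induction cl generalizing s with
  | nil => simp
  | cons ckw t ih =>
    have hc : (pvCounts d).getD ckw.1 0
        = ((((PySem.Dict.mk d).values).countP (fun v => decide (ckw.1 ∈ pvTokens v))) : Int) := by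
      unfold pvCounts
      rw [pv_counts_getD]; simp
    rw [List.foldl_cons, ih, pv_inner_scan, List.map_cons, List.flatten_cons, hc]
    simp [PySem.List.pyRepeat, List.append_assoc]

-- the two yes-loops build the same list of parts
theorem pv_yes_eq (d : List (String × String)) (ck : List Char) :
    (PySem.List.pyRange 3 7 1).foldl (fun ck key =>
      if pvGet d (PySem.Int.toStr key) = some "Yes" then
        if key = 3 then ck ++ "* 시력교정술 * 장시간의 렌즈 착용".toList
        else if key = 4 then ck ++ "* 눈물 증발 증가".toList
        else if key = 5 then ck ++ "* 마이봄샘 이상".toList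
        else if key = 6 then ck ++ "* 마이봄샘 막힘".toList
        else ck
      else ck) ck
    = ck ++ (pvYesList.foldl (fun acc p =>
        if pvGet d p.1 = some "Yes" then acc ++ [p.2] else acc) []).flatten := by
  have hr : PySem.List.pyRange 3 7 1 = [3, 4, 5, 6] := by decide
  have h3 : PySem.Int.toStr 3 = "3" := by decide
  have h4 : PySem.Int.toStr 4 = "4" := by decide
  have h5 : PySem.Int.toStr 5 = "5" := by decide
  have h6 : PySem.Int.toStr 6 = "6" := by decide
  rw [hr]
  simp only [List.foldl_cons, List.foldl_nil, h3, h4, h5, h6, pvYesList]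
  by_cases c3 : pvGet d "3" = some "Yes" <;>
    by_cases c4 : pvGet d "4" = some "Yes" <;>
      by_cases c5 : pvGet d "5" = some "Yes" <;>
        by_cases c6 : pvGet d "6" = some "Yes" <;>
          simp [c3, c4, c5, c6]

-- the built keyword strings are equal, hence so are the returned lists
set_option maxHeartbeats 2000000 in
set_option maxRecDepth 4096 in
theorem pv_main (d : List (String × String)) :
    process_causes d = process_causes_alt d := by
  have hyes0 :
      pvYesList.foldl (fun acc p =>
        if pvGet d p.1 = some "Yes" then acc ++ [p.2] else acc)
        (if pvAgeHit d then ["* 40대 이상 (노화)".toList] else [])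
      = (if pvAgeHit d then ["* 40대 이상 (노화)".toList] else []) ++
        pvYesList.foldl (fun acc p =>
          if pvGet d p.1 = some "Yes" then acc ++ [p.2] else acc) [] := by
    by_cases c3 : pvGet d "3" = some "Yes" <;>
      by_cases c4 : pvGet d "4" = some "Yes" <;>
        by_cases c5 : pvGet d "5" = some "Yes" <;>
          by_cases c6 : pvGet d "6" = some "Yes" <;>
            simp [pvYesList, c3, c4, c5, c6]
  unfold process_causes process_causes_alt
  simp only [pv_yes_eq, pv_cond_loop, PySem.List.foldl_append_singleton_eq_map, hyes0]
  congr 1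
  by_cases ha : pvAgeHit d <;> simp [ha]

-- ===== VERDICT (by name: the statement is the Claim_ definition above) =====
theorem process_causes_spec : Claim_equal_process_causes := by
  intro d _ _
  unfold Spec_process_causes
  exact pv_main d

set_option maxHeartbeats 2000000 in
@[simp]
theorem process_causes_raises : Claim_raises_process_causes := by
  unfold Claim_raises_process_causes
  constructor
  · intro d _ hr hp; exact hp hr
  · exact ⟨by decide, by decide, by decide⟩
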